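-- pv_equiv track=rewrite | github.com/visudevaram/Python_learning | Teamform.py | teamFormation
-- ===== SOURCE A (Python) =====
-- def teamFormation(score, team, m):
--     x = score
--     res = 0
--     if len(score) == team:
--         res = sum(x)
--     else:
--         if (len(score) <= m*2):
--             res = sum(sorted(score,reverse=True)[:team])
--         else:
--             for i in range(0,team):
--                 y = x[:m]+x[-m:]
--                 mx = max(y)
--                 z = x.index(mx)
--                 res = res+mx
--                 if z < m:
--                     del x[z]
--                 else:
--                     z = x[::-1].index(mx)
--                     del x[-(z+1)]
--
--     return res;
-- ===== SOURCE B (Python) =====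
-- def teamFormation(score, team, m):
--     n = len(score)
--     if n == team:
--         return sum(score)
--     if n <= m * 2:
--         return sum(sorted(score, reverse=True)[:team])
--     front = score[:m]
--     back = score[n - m:]
--     i, j = m, n - m - 1          # next elements to enter the front / back window
--     res = 0
--     t = 0
--     while t < team and i <= j:
--         mx = max(front + back)
--         res += mx
--         if mx in front:
--             front.remove(mx)
--             front.append(score[i])
--             i += 1
--         else:
--             k = len(back) - 1 - back[::-1].index(mx)
--             del back[k]
--             back.insert(0, score[j])
--             j -= 1
--         t += 1
--     if t < team:
--         res += sum(sorted(front + back, reverse=True)[:team - t])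
--     return res
-- ===== Notes on version B (the rewrite author's own statement) =====
-- stated objective: alternative
-- what changed: A rescans and mutates the whole remaining list on every pick (slice concat, list.index, full reversal, del); B keeps just the two m-element boundary windows fed by two index pointers into the untouched input, and replaces the overlapping-window endgame by a single sort of the final 2m window.
-- outside the precondition, e.g. on teamFormation([1, 2, 3], 1, 0): A returns 3, B raises ValueError; on teamFormation([1, 2, 3], 1, -1): A returns 3, B returns 2
import Mathlib
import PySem

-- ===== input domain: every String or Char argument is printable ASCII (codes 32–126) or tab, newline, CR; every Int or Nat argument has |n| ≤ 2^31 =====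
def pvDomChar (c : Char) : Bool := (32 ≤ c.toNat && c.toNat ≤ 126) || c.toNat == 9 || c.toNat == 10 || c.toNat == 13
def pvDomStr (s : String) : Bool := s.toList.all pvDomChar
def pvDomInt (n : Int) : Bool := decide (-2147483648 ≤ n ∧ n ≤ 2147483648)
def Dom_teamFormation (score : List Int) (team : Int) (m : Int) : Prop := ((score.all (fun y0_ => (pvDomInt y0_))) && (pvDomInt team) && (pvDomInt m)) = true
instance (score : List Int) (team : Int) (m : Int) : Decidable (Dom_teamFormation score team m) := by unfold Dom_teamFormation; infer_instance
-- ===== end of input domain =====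

-- B replaces A's per-pick rescans of the whole list (slices, index, reversal: O(team*n)) by two
-- m-sized window lists fed through index pointers, plus a single sort of the final window
-- (O(n + team*m + m log m)); equivalence is about the RETURN value only — A also mutates its
-- `score` argument in place (del), which B does not.

-- ===== PORT A =====
-- one iteration of A's for-loop: state = (x, res)
def teamFormationStepA (m : Int) (s : List Int × Int) : List Int × Int :=
  let x := s.1
  let y := PySem.List.slice x none (some m) ++ PySem.List.slice x (some (-m)) none
  let mx := (PySem.List.max? y (fun v => v)).getD 0          -- max(y); empty y raises in Python (outside Pre_)
  let z : Nat := (PySem.List.index? x mx).getD 0             -- x.index(mx); ValueError outside Pre_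
  let res := s.2 + mx
  if (z : Int) < m then
    (x.eraseIdx z, res)                                      -- del x[z]
  else
    let z2 : Nat := (PySem.List.index? x.reverse mx).getD 0  -- x[::-1].index(mx)
    (x.eraseIdx (x.length - 1 - z2), res)                    -- del x[-(z2+1)]

def teamFormation (score : List Int) (team : Int) (m : Int) : Int :=
  if (score.length : Int) = team then score.sum
  else if (score.length : Int) ≤ m * 2 then
    (PySem.List.slice (PySem.List.sorted score (fun v => v) true) none (some team)).sum
  else
    ((PySem.List.pyRange 0 team 1).foldl (fun s _ => teamFormationStepA m s) (score, 0)).2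

-- ===== PORT B =====
-- the while-loop of Source B: front/back are the two m-element windows, score[i] / score[j] are the
-- next elements to enter them; the loop state is (front, back, t, res).  `fuel` is the loop's
-- termination measure j - i + 1 (the number of pending middle elements), made an explicit Nat
-- argument so the recursion is structural; it is initialised to exactly that value below.
def teamFormationAltGo (score : List Int) (team m : Int) :
    Nat → List Int → List Int → Int → Int → Int → Int → (List Int × List Int × Int × Int)
  | 0, front, back, _, _, t, res => (front, back, t, res)
  | fuel + 1, front, back, i, j, t, res =>
    if t < team ∧ i ≤ j then
      let mx := (PySem.List.max? (front ++ back) (fun v => v)).getD 0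
      let res := res + mx
      if mx ∈ front then
        teamFormationAltGo score team m fuel
          (((PySem.List.remove? front mx).getD front) ++ [PySem.List.pyGetD score i 0])
          back (i + 1) j (t + 1) res
      else
        let k : Nat := back.length - 1 - (PySem.List.index? back.reverse mx).getD 0
        teamFormationAltGo score team m fuel front
          (PySem.List.insert (back.eraseIdx k) 0 (PySem.List.pyGetD score j 0))
          i (j - 1) (t + 1) res
    else (front, back, t, res)

def teamFormation_alt (score : List Int) (team : Int) (m : Int) : Int :=
  let n : Int := score.length
  if n = team then score.sum
  else if n ≤ m * 2 then
    (PySem.List.slice (PySem.List.sorted score (fun v => v) true) none (some team)).sum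
  else
    match teamFormationAltGo score team m (n - 2 * m).toNat
        (PySem.List.slice score none (some m))
        (PySem.List.slice score (some (n - m)) none)
        m (n - m - 1) 0 0 with
    | (front, back, t, res) =>
      if t < team then
        res + (PySem.List.slice (PySem.List.sorted (front ++ back) (fun v => v) true)
                 none (some (team - t))).sum
      else res

-- ===== PRECONDITION & SPEC =====
-- Pre_ excludes (a) non-positive window sizes m in the scan branch when at least one pick is
-- requested (degenerate windows: A's slice arithmetic there accidentally scans the whole list
-- or raises) and (b) team exceeding len(score) in the scan branch, where A raises ValueError
-- on the empty window.
def Pre_teamFormation (score : List Int) (team : Int) (m : Int) : Prop :=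
  (score.length : Int) = team ∨ (score.length : Int) ≤ m * 2
    ∨ (team ≤ (score.length : Int) ∧ (1 ≤ m ∨ team ≤ 0))
instance (score : List Int) (team : Int) (m : Int) : Decidable (Pre_teamFormation score team m) := by
  unfold Pre_teamFormation; infer_instance

def pvWitness_teamFormation : List Int × Int × Int := ([5, 1, 9, 2, 7, 0, 4], 3, 2)

def Spec_teamFormation (score : List Int) (team : Int) (m : Int) (out : Int) : Prop :=
  out = teamFormation_alt score team m
instance (score : List Int) (team : Int) (m : Int) (out : Int) : Decidable (Spec_teamFormation score team m out) := by
  unfold Spec_teamFormation; infer_instance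

-- ===== CLAIM (what is proved, stated in full; the proofs are below) =====
def Claim_equal_teamFormation : Prop := ∀ (score : List Int) (team : Int) (m : Int), Dom_teamFormation score team m → Pre_teamFormation score team m → Spec_teamFormation score team m (teamFormation score team m)
-- ===== LEMMAS AND PROOFS =====

def altTail (team : Int) : List Int × List Int × Int × Int → Int
  | (front, back, t, res) =>
    if t < team then
      res + (PySem.List.slice (PySem.List.sorted (front ++ back) (fun v => v) true)
               none (some (team - t))).sum
    else res

-- slices used by stepA, for 1 ≤ m
theorem slice_front {x : List Int} {m : Int} (hm : 1 ≤ m) :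
    PySem.List.slice x none (some m) = x.take m.toNat :=
  PySem.List.slice_to x (by omega)

theorem slice_back {x : List Int} {m : Int} (hm : 1 ≤ m) :
    PySem.List.slice x (some (-m)) none = x.drop (x.length - m.toNat) := by
  have h := PySem.List.slice_from_neg_natCast x m.toNat (by omega)
  rw [Int.toNat_of_nonneg (by omega : (0:Int) ≤ m)] at h
  exact h

theorem cover_mem {m : Int} {x : List Int} (hlen : (x.length : Int) ≤ 2 * m) :
    ∀ v ∈ x, v ∈ x.take m.toNat ++ x.drop (x.length - m.toNat) := by
  intro v hv
  rw [List.mem_iff_getElem] at hv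
  obtain ⟨idx, hidx, rfl⟩ := hv
  rw [List.mem_append]
  by_cases hlt : idx < m.toNat
  · left
    rw [List.mem_iff_getElem]
    exact ⟨idx, by simp [hlt, hidx], by simp⟩
  · right
    rw [List.mem_iff_getElem]
    refine ⟨idx - (x.length - m.toNat), by simp; omega, ?_⟩
    rw [List.getElem_drop]
    congr 1
    omega

theorem max_spec {x y : List Int} (hyx : ∀ v ∈ y, v ∈ x) (hxy : ∀ v ∈ x, v ∈ y) (hne : y ≠ []) :
    ∃ mx, PySem.List.max? y (fun v => v) = some mx ∧ mx ∈ x ∧ ∀ v ∈ x, v ≤ mx := by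
  cases h : PySem.List.max? y (fun v => v) with
  | none => exact absurd ((PySem.List.max?_eq_none_iff _ _).1 h) hne
  | some mx =>
    exact ⟨mx, rfl, hyx _ (PySem.List.max?_mem h), fun v hv => PySem.List.max?_isMax h v (hxy v hv)⟩

theorem first_occ_eraseIdx {x : List Int} {v : Int} {z : Nat}
    (h : PySem.List.index? x v = some z) : x.eraseIdx z = x.erase v := by
  obtain ⟨pre, suf, rfl, hlen, hnm⟩ := (PySem.List.index?_eq_some_iff _ _ _).1 h
  subst hlen
  rw [List.eraseIdx_append_of_length_le (le_refl _), List.erase_append_right _ hnm]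
  simp

theorem last_occ_eraseIdx {x : List Int} {v : Int} {z2 : Nat}
    (h : PySem.List.index? x.reverse v = some z2) :
    (x.eraseIdx (x.length - 1 - z2)).Perm (x.erase v) ∧ x.length - 1 - z2 < x.length := by
  obtain ⟨pre, suf, hrev, hlen, hnm⟩ := (PySem.List.index?_eq_some_iff _ _ _).1 h
  have hx : x = suf.reverse ++ v :: pre.reverse := by
    have := congrArg List.reverse hrev
    simpa using this
  have hmem : v ∈ x := by rw [hx]; simp
  have hlx : x.length = pre.length + suf.length + 1 := by
    have := congrArg List.length hrev
    simpa [List.length_reverse] using this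
  have hidx : x.length - 1 - z2 = suf.length := by omega
  constructor
  · rw [hidx, hx]
    have herase : (suf.reverse ++ v :: pre.reverse).eraseIdx suf.length
        = suf.reverse ++ pre.reverse := by
      rw [show suf.length = suf.reverse.length by simp] 
      rw [List.eraseIdx_append_of_length_le (le_refl _)]
      simp
    rw [herase]
    have h1 : (v :: (suf.reverse ++ pre.reverse)).Perm (suf.reverse ++ v :: pre.reverse) :=
      List.perm_middle.symm
    have h2 := List.perm_cons_erase (show v ∈ suf.reverse ++ v :: pre.reverse by simp)
    exact (h1.trans h2).cons_inv
  · omega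

theorem stepA_phase2 {m : Int} {x : List Int} {res : Int} (hm : 1 ≤ m)
    (hlen : (x.length : Int) ≤ 2 * m) (hne : x ≠ []) :
    ∃ mx x', teamFormationStepA m (x, res) = (x', res + mx) ∧ mx ∈ x ∧ (∀ v ∈ x, v ≤ mx)
      ∧ x'.Perm (x.erase mx) ∧ x'.length + 1 = x.length := by
  have hset : PySem.List.slice x none (some m) ++ PySem.List.slice x (some (-m)) none
      = x.take m.toNat ++ x.drop (x.length - m.toNat) := by rw [slice_front hm, slice_back hm]
  have hyne : x.take m.toNat ++ x.drop (x.length - m.toNat) ≠ [] := by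
    intro hc
    rcases List.append_eq_nil_iff.1 hc with ⟨h1, h2⟩
    have h3 := congrArg List.length h1
    rw [List.length_take, List.length_nil] at h3
    have hx0 : x.length = 0 := by omega
    exact hne (List.length_eq_zero_iff.1 hx0)
  obtain ⟨mx, hmx, hmem, hmax⟩ := max_spec
    (fun v hv => by rcases List.mem_append.1 hv with h | h
                    exacts [List.mem_of_mem_take h, List.mem_of_mem_drop h])
    (cover_mem hlen) hyne
  obtain ⟨z, hz⟩ := (PySem.List.index?_isSome_iff _ _).2 hmem |> Option.isSome_iff_exists.1
  obtain ⟨hzlt, hget, _⟩ := PySem.List.getElem_of_index?_eq_some hz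
  unfold teamFormationStepA
  dsimp only
  simp only [hset, hmx, Option.getD_some, hz]
  by_cases hbr : ((z : Nat) : Int) < m
  · rw [if_pos hbr]
    refine ⟨mx, _, rfl, hmem, hmax, ?_, ?_⟩
    · rw [first_occ_eraseIdx hz]
    · rw [first_occ_eraseIdx hz, List.length_erase_of_mem hmem]
      omega
  · rw [if_neg hbr]
    have hmemr : mx ∈ x.reverse := by simpa using hmem
    obtain ⟨z2, hz2⟩ := (PySem.List.index?_isSome_iff _ _).2 hmemr |> Option.isSome_iff_exists.1
    obtain ⟨hperm, hlt⟩ := last_occ_eraseIdx hz2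
    simp only [hz2, Option.getD_some]
    refine ⟨mx, _, rfl, hmem, hmax, hperm, ?_⟩
    rw [List.length_eraseIdx_of_lt hlt]
    omega

def sd (xs : List Int) : List Int := PySem.List.sorted xs (fun v => v) true

theorem sd_pairwise (xs : List Int) : (sd xs).Pairwise (fun a b => b ≤ a) := by
  have := PySem.List.sorted_pairwise_rev (xs := xs) (key := fun v : Int => v)
  simpa [sd] using this

theorem sd_perm (xs : List Int) : (sd xs).Perm xs := PySem.List.sorted_perm _ _ _

theorem desc_unique {l1 l2 : List Int} (hp : l1.Perm l2)
    (h1 : l1.Pairwise (fun a b => b ≤ a)) (h2 : l2.Pairwise (fun a b => b ≤ a)) : l1 = l2 :=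
  PySem.List.eq_of_perm_of_pairwise_le_of_injective (fun v : Int => -v)
      (by exact neg_injective) hp (by simpa using h1) (by simpa using h2)

theorem sd_perm_eq {l1 l2 : List Int} (hp : l1.Perm l2) : sd l1 = sd l2 :=
  desc_unique ((sd_perm l1).trans (hp.trans (sd_perm l2).symm)) (sd_pairwise l1) (sd_pairwise l2)

theorem sd_cons_max {x : List Int} {mx : Int} (hmem : mx ∈ x) (hmax : ∀ v ∈ x, v ≤ mx) :
    sd x = mx :: sd (x.erase mx) := by
  refine desc_unique ?_ (sd_pairwise x) ?_
  · exact (sd_perm x).trans ((List.perm_cons_erase hmem).trans (((sd_perm _).symm).cons mx))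
  · refine List.pairwise_cons.2 ⟨?_, sd_pairwise _⟩
    intro v hv
    exact hmax v (x.erase_sublist.subset ((sd_perm _).mem_iff.1 hv))

theorem phase2 (m : Int) (hm : 1 ≤ m) :
    ∀ (k : Nat) (x : List Int) (res : Int), (x.length : Int) ≤ 2 * m → k ≤ x.length →
    ((teamFormationStepA m)^[k] (x, res)).2 = res + ((sd x).take k).sum
  | 0, x, res, _, _ => by simp
  | k + 1, x, res, hlen, hk => by
    have hne : x ≠ [] := by
      intro h; subst h; simp at hk
    obtain ⟨mx, x', hstep, hmem, hmax, hperm, hlen'⟩ := stepA_phase2 hm hlen hne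
    have hxlen : x'.length + 1 = x.length := hlen'
    rw [Function.iterate_succ_apply, hstep,
      phase2 m hm k x' (res + mx) (by omega) (by omega)]
    rw [sd_perm_eq hperm, sd_cons_max hmem hmax]
    simp
    omega

theorem slice_self_nil (score : List Int) {i : Int} (h0 : 0 ≤ i) :
    PySem.List.slice score (some i) (some i) = [] := by
  rw [PySem.List.slice_toNat _ h0 h0]
  simp

theorem length_slice_of (score : List Int) {a b : Int} (h0 : 0 ≤ a) (hab : a ≤ b)
    (hb : b ≤ (score.length : Int)) :
    ((PySem.List.slice score (some a) (some b)).length : Int) = b - a := by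
  rw [PySem.List.slice_toNat _ h0 (by omega)]
  simp
  omega

theorem slice_cons_head (score : List Int) {i j : Int} (h0 : 0 ≤ i) (hij : i ≤ j)
    (hj : j + 1 ≤ (score.length : Int)) :
    PySem.List.slice score (some i) (some (j + 1))
      = PySem.List.pyGetD score i 0 :: PySem.List.slice score (some (i + 1)) (some (j + 1)) := by
  rw [PySem.List.slice_toNat _ h0 (by omega), PySem.List.slice_toNat _ (by omega) (by omega)]
  have hi : i.toNat < score.length := by omega
  rw [List.drop_eq_getElem_cons hi]
  rw [PySem.List.pyGetD_eq_getElem _ _ h0 (by omega)]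
  rw [show (j + 1).toNat - i.toNat = ((j + 1).toNat - (i + 1).toNat) + 1 by omega]
  rw [List.take_succ_cons]
  congr 2
  congr 1
  omega

theorem slice_snoc (score : List Int) {i j : Int} (h0 : 0 ≤ i) (hij : i ≤ j)
    (hj : j < (score.length : Int)) :
    PySem.List.slice score (some i) (some (j + 1))
      = PySem.List.slice score (some i) (some j) ++ [PySem.List.pyGetD score j 0] := by
  rw [PySem.List.slice_toNat _ h0 (by omega), PySem.List.slice_toNat _ h0 (by omega)]
  rw [show (j + 1).toNat - i.toNat = (j.toNat - i.toNat) + 1 by omega]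
  rw [List.take_add_one]
  congr 1
  have hget : (score.drop i.toNat)[j.toNat - i.toNat]? = some score[j.toNat] := by
    rw [List.getElem?_drop]
    rw [show i.toNat + (j.toNat - i.toNat) = j.toNat by omega]
    exact List.getElem?_eq_getElem (by omega)
  rw [hget, PySem.List.pyGetD_eq_getElem _ _ (by omega) (by omega)]
  simp

theorem foldl_const_iterate {α β : Type} (l : List α) (f : β → β) (s : β) :
    l.foldl (fun s _ => f s) s = f^[l.length] s := by
  induction l generalizing s with
  | nil => rfl
  | cons a tl ih => simp [List.foldl, ih, Function.iterate_succ_apply]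

theorem phase1 (score : List Int) (team m : Int) (hm : 1 ≤ m) :
    ∀ (fuel : Nat) (front back : List Int) (i j t res : Int),
    (front.length : Int) = m → (back.length : Int) = m →
    m ≤ i → i ≤ j + 1 → j + 1 ≤ (score.length : Int) - m →
    (fuel : Int) = j + 1 - i →
    ((team - t).toNat : Int) ≤ 2 * m + (j + 1 - i) →
    ((teamFormationStepA m)^[(team - t).toNat]
        (front ++ PySem.List.slice score (some i) (some (j + 1)) ++ back, res)).2
      = altTail team (teamFormationAltGo score team m fuel front back i j t res)
  | 0, front, back, i, j, t, res, hlf, hlb, hmi, hij, hj, hfuel, hcnt => by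
    have hi0 : (0:Int) ≤ i := by omega
    have hieq : j + 1 = i := by omega
    rw [hieq, slice_self_nil score hi0]
    simp only [teamFormationAltGo, altTail]
    by_cases ht : t < team
    · rw [if_pos ht]
      rw [PySem.List.slice_to _ (by omega : (0:Int) ≤ team - t)]
      have hlen : ((front ++ [] ++ back).length : Int) ≤ 2 * m := by
        simp; omega
      have hk : (team - t).toNat ≤ (front ++ [] ++ back).length := by
        simp at hlen ⊢; omega
      rw [phase2 m hm _ _ _ hlen hk]
      simp [sd]
    · rw [if_neg ht]
      have h0 : (team - t).toNat = 0 := by omega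
      rw [h0]
      simp
  | fuel + 1, front, back, i, j, t, res, hlf, hlb, hmi, hij, hj, hfuel, hcnt => by
    have hi0 : (0:Int) ≤ i := by omega
    have hij2 : i ≤ j := by
      have : (((fuel + 1 : Nat)) : Int) = j + 1 - i := hfuel
      push_cast at this
      omega
    by_cases ht : t < team
    case neg =>
      simp only [teamFormationAltGo]
      rw [if_neg (by tauto)]
      have h0 : (team - t).toNat = 0 := by omega
      rw [h0]
      simp [altTail]
      intro hc
      exact absurd hc ht
    case pos =>
    -- set up the decomposition
    set mid := PySem.List.slice score (some i) (some (j + 1)) with hmid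
    have hmlen : (mid.length : Int) = j + 1 - i := by
      rw [hmid]
      exact length_slice_of score hi0 (by omega) (by omega)
    have hxassoc : front ++ mid ++ back = front ++ (mid ++ back) := by
      simp [List.append_assoc]
    have htake : (front ++ mid ++ back).take m.toNat = front := by
      rw [hxassoc, show m.toNat = front.length by omega]
      exact List.take_left
    have hdropn : (front ++ mid ++ back).length - m.toNat = (front ++ mid).length := by
      simp
      omega
    have hdrop : (front ++ mid ++ back).drop ((front ++ mid ++ back).length - m.toNat) = back := by
      rw [hdropn]
      exact List.drop_left
    have hset : PySem.List.slice (front ++ mid ++ back) none (some m)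
        ++ PySem.List.slice (front ++ mid ++ back) (some (-m)) none = front ++ back := by
      rw [slice_front hm, slice_back hm, htake, hdrop]
    have hfbne : front ++ back ≠ [] := by
      intro hc
      rcases List.append_eq_nil_iff.1 hc with ⟨h1, _⟩
      rw [h1] at hlf
      simp at hlf
      omega
    obtain ⟨mx, hmx⟩ : ∃ mx, PySem.List.max? (front ++ back) (fun v => v) = some mx := by
      cases h : PySem.List.max? (front ++ back) (fun v => v) with
      | none => exact absurd ((PySem.List.max?_eq_none_iff _ _).1 h) hfbne
      | some mx => exact ⟨mx, rfl⟩
    have hmemfb : mx ∈ front ++ back := PySem.List.max?_mem hmx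
    have hmemx : mx ∈ front ++ mid ++ back := by
      rcases List.mem_append.1 hmemfb with h | h
      · exact List.mem_append.2 (Or.inl (List.mem_append.2 (Or.inl h)))
      · exact List.mem_append.2 (Or.inr h)
    obtain ⟨z, hz⟩ := Option.isSome_iff_exists.1 ((PySem.List.index?_isSome_iff _ _).2 hmemx)
    -- one unfolded A-step, by cases on where mx sits
    by_cases hf : mx ∈ front
    · -- front removal
      have hidx : PySem.List.index? (front ++ mid ++ back) mx = PySem.List.index? front mx := by
        rw [hxassoc]
        exact PySem.List.index?_append_of_mem _ hf
      obtain ⟨zf, hzf⟩ := Option.isSome_iff_exists.1 ((PySem.List.index?_isSome_iff _ _).2 hf)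
      obtain ⟨hzflt, _, _⟩ := PySem.List.getElem_of_index?_eq_some hzf
      have hzeq : z = zf := by
        rw [hidx, hzf] at hz
        exact (Option.some_inj.1 hz).symm
      have hstep : teamFormationStepA m (front ++ mid ++ back, res)
          = (front.erase mx ++ mid ++ back, res + mx) := by
        unfold teamFormationStepA
        dsimp only
        rw [hset, hmx]
        simp only [Option.getD_some, hz, hzeq]
        rw [if_pos (by omega : ((zf : Nat) : Int) < m)]
        rw [show front ++ mid ++ back = front ++ (mid ++ back) from hxassoc,
          List.eraseIdx_append_of_lt_length hzflt, first_occ_eraseIdx hzf]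
        rw [← List.append_assoc]
      have hfl1 : 0 < front.length := List.length_pos_of_mem hf
      have hKs : (team - t).toNat = (team - (t + 1)).toNat + 1 := by omega
      rw [hKs, Function.iterate_succ_apply, hstep]
      have hgo : teamFormationAltGo score team m (fuel + 1) front back i j t res
          = teamFormationAltGo score team m fuel
              (front.erase mx ++ [PySem.List.pyGetD score i 0]) back (i + 1) j (t + 1) (res + mx) := by
        simp only [teamFormationAltGo]
        rw [if_pos ⟨ht, hij2⟩]
        rw [hmx]
        simp only [Option.getD_some]
        rw [if_pos hf, PySem.List.remove?_eq_some_erase front mx hf]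
        simp only [Option.getD_some]
      rw [hgo]
      have hmidc : mid = PySem.List.pyGetD score i 0
          :: PySem.List.slice score (some (i + 1)) (some (j + 1)) :=
        slice_cons_head score hi0 hij2 (by omega)
      have hxeq : front.erase mx ++ mid ++ back
          = (front.erase mx ++ [PySem.List.pyGetD score i 0])
              ++ PySem.List.slice score (some (i + 1)) (some (j + 1)) ++ back := by
        rw [hmidc]; simp
      rw [hxeq]
      exact phase1 score team m hm fuel _ back (i + 1) j (t + 1) (res + mx)
        (by rw [List.length_append, List.length_erase_of_mem hf]; simp; omega)
        hlb (by omega) (by omega) hj (by push_cast at hfuel ⊢; omega) (by omega)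
    · -- back removal
      have hmemb : mx ∈ back := by
        rcases List.mem_append.1 hmemfb with h | h
        · exact absurd h hf
        · exact h
      have hbl1 : 0 < back.length := List.length_pos_of_mem hmemb
      obtain ⟨hzlt, hzget, _⟩ := PySem.List.getElem_of_index?_eq_some hz
      have hznm : ¬ ((z : Nat) : Int) < m := by
        intro hc
        apply hf
        have hzf : z < front.length := by omega
        have hzlt' : z < (front ++ (mid ++ back)).length := by rw [← hxassoc]; exact hzlt
        have e1 : (front ++ mid ++ back)[z]'hzlt = (front ++ (mid ++ back))[z]'hzlt' :=
          List.getElem_of_eq hxassoc hzlt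
        have e2 : (front ++ (mid ++ back))[z]'hzlt' = front[z]'hzf :=
          List.getElem_append_left hzf
        rw [e1, e2] at hzget
        rw [← hzget]
        exact List.getElem_mem hzf
      have hrevx : (front ++ mid ++ back).reverse
          = back.reverse ++ (mid.reverse ++ front.reverse) := by
        simp
      have hmembr : mx ∈ back.reverse := by simpa using hmemb
      have hidxr : PySem.List.index? (front ++ mid ++ back).reverse mx
          = PySem.List.index? back.reverse mx := by
        rw [hrevx]
        exact PySem.List.index?_append_of_mem _ hmembr
      obtain ⟨zb, hzb⟩ := Option.isSome_iff_exists.1 ((PySem.List.index?_isSome_iff _ _).2 hmembr)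
      obtain ⟨hzblt, _, _⟩ := PySem.List.getElem_of_index?_eq_some hzb
      rw [List.length_reverse] at hzblt
      have hstep : teamFormationStepA m (front ++ mid ++ back, res)
          = (front ++ mid ++ back.eraseIdx (back.length - 1 - zb), res + mx) := by
        unfold teamFormationStepA
        dsimp only
        rw [hset, hmx]
        simp only [Option.getD_some, hz]
        rw [if_neg hznm, hidxr, hzb]
        simp only [Option.getD_some]
        have hlenx : (front ++ mid ++ back).length - 1 - zb
            = (front ++ mid).length + (back.length - 1 - zb) := by
          simp
          omega
        rw [show front ++ mid ++ back = (front ++ mid) ++ back by rfl, hlenx,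
          List.eraseIdx_append_of_length_le (by omega)]
        rw [show (front ++ mid).length + (back.length - 1 - zb) - (front ++ mid).length
          = back.length - 1 - zb by omega]
      have hKs : (team - t).toNat = (team - (t + 1)).toNat + 1 := by omega
      rw [hKs, Function.iterate_succ_apply, hstep]
      have hgo : teamFormationAltGo score team m (fuel + 1) front back i j t res
          = teamFormationAltGo score team m fuel front
              (PySem.List.pyGetD score j 0 :: back.eraseIdx (back.length - 1 - zb))
              i (j - 1) (t + 1) (res + mx) := by
        simp only [teamFormationAltGo]
        rw [if_pos ⟨ht, hij2⟩]
        rw [hmx]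
        simp only [Option.getD_some]
        rw [if_neg hf, hzb]
        simp only [Option.getD_some]
        rw [PySem.List.insert_zero]
      rw [hgo]
      have hmids : mid = PySem.List.slice score (some i) (some j)
          ++ [PySem.List.pyGetD score j 0] :=
        slice_snoc score hi0 hij2 (by omega)
      have hxeq : front ++ mid ++ back.eraseIdx (back.length - 1 - zb)
          = front ++ PySem.List.slice score (some i) (some ((j - 1) + 1))
              ++ (PySem.List.pyGetD score j 0 :: back.eraseIdx (back.length - 1 - zb)) := by
        rw [show j - 1 + 1 = j by omega, hmids]
        simp
      rw [hxeq]
      have hble : (back.eraseIdx (back.length - 1 - zb)).length = back.length - 1 :=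
        List.length_eraseIdx_of_lt (by omega)
      exact phase1 score team m hm fuel front _ i (j - 1) (t + 1) (res + mx)
        hlf (by simp [hble]; omega) hmi (by omega) (by omega)
        (by push_cast at hfuel ⊢; omega) (by omega)

theorem teamFormation_eq_alt (score : List Int) (team m : Int)
    (hpre : Pre_teamFormation score team m) :
    teamFormation score team m = teamFormation_alt score team m := by
  by_cases h1 : (score.length : Int) = team
  · simp [teamFormation, teamFormation_alt, h1]
  · by_cases h2 : (score.length : Int) ≤ m * 2
    · simp [teamFormation, teamFormation_alt, h1, h2]
    · obtain ⟨hteam, hm'⟩ : team ≤ (score.length : Int) ∧ (1 ≤ m ∨ team ≤ 0) := by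
        rcases hpre with h | h | h
        exacts [absurd h h1, absurd h h2, h]
      rcases hm' with hm | ht0
      swap
      · -- no pick requested: A's for-loop body never runs and B's while-loop is never entered
        have hA : teamFormation score team m = 0 := by
          rw [teamFormation, if_neg h1, if_neg h2,
            PySem.List.pyRange_one_eq_nil (by omega : team ≤ 0)]
          rfl
        have hgo : ∀ (fuel : Nat) (f b : List Int) (i j : Int),
            teamFormationAltGo score team m fuel f b i j 0 0 = (f, b, 0, 0) := by
          intro fuel f b i j
          cases fuel with
          | zero => rfl
          | succ k =>
            simp only [teamFormationAltGo]
            rw [if_neg (by intro hc; omega)]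
        rw [hA, teamFormation_alt]
        simp only [if_neg h1, if_neg h2, hgo]
        rw [if_neg (by omega : ¬ (0:Int) < team)]
      set n : Int := (score.length : Int) with hn
      have h2m : 2 * m < n := by omega
      have hm0 : (0:Int) ≤ m := by omega
      -- B side to altTail form
      have hBfun : ∀ s : List Int × List Int × Int × Int,
          (match s with
           | (front, back, t, res) =>
             if t < team then
               res + (PySem.List.slice (PySem.List.sorted (front ++ back) (fun v => v) true)
                        none (some (team - t))).sum
             else res) = altTail team s := by
        rintro ⟨f, b, t, r⟩
        rfl
      have hB : teamFormation_alt score team m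
          = altTail team (teamFormationAltGo score team m (n - 2 * m).toNat
              (PySem.List.slice score none (some m))
              (PySem.List.slice score (some (n - m)) none)
              m (n - m - 1) 0 0) := by
        rw [teamFormation_alt]
        simp only [← hn, if_neg h1, if_neg h2]
        exact hBfun _
      rw [hB]
      -- A side to iterate form
      have hA : teamFormation score team m
          = ((teamFormationStepA m)^[(team - 0).toNat] (score, 0)).2 := by
        rw [teamFormation, if_neg h1, if_neg h2, foldl_const_iterate,
          PySem.List.length_pyRange_one]
      rw [hA]
      -- decompose score
      have hdec : PySem.List.slice score none (some m)
          ++ PySem.List.slice score (some m) (some ((n - m - 1) + 1))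
          ++ PySem.List.slice score (some (n - m)) none = score := by
        rw [show (n - m - 1) + 1 = n - m by ring]
        rw [PySem.List.slice_to _ hm0, PySem.List.slice_from _ (by omega),
          PySem.List.slice_toNat _ hm0 (by omega)]
        have h3 : (score.drop m.toNat).drop ((n - m).toNat - m.toNat)
            = score.drop (n - m).toNat := by
          rw [List.drop_drop]
          congr 1
          omega
        rw [List.append_assoc, ← h3, List.take_append_drop, List.take_append_drop]
      have hflen : ((PySem.List.slice score none (some m)).length : Int) = m := by
        rw [PySem.List.slice_to _ hm0]
        simp
        omega
      have hblen : ((PySem.List.slice score (some (n - m)) none).length : Int) = m := by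
        rw [PySem.List.slice_from _ (by omega)]
        simp
        omega
      conv_lhs => rw [← hdec]
      exact phase1 score team m hm (n - 2 * m).toNat _ _ m (n - m - 1) 0 0
        hflen hblen le_rfl (by omega) (by omega) (by omega) (by omega)

-- ===== VERDICT (by name: the statement is the Claim_ definition above) =====
theorem teamFormation_spec : Claim_equal_teamFormation := by
  intro score team m _ hpre
  unfold Spec_teamFormation
  exact teamFormation_eq_alt score team m hpre
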